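-- pv_equiv track=rewrite | github.com/stanalyzer/ST-analyzer | stanalyzer/static/analyzers/lipidArea.py | mkimagebox
-- ===== SOURCE A (Python) =====
-- def mkimagebox(CRDs, size_x, size_y):
--     # 5 |    3      | 7
--     # 1 | primary 0 | 2
--     # 6 |     4     | 8
--     box0 = CRDs; box1 = []; box2 = [];
--     box3 = [];   box4 = []; box5 = [];
--     box6 = [];   box7 = []; box8 = [];
--
--     for crd in CRDs:
--         # box1
--         x = crd[0] - size_x;
--         y = crd[1];
--         tmp = [x, y];
--         box1.append(tmp);
--
--         # box2
--         x = crd[0] + size_x;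
--         y = crd[1];
--         tmp = [x, y];
--         box2.append(tmp);
--
--         # box3
--         x = crd[0];
--         y = crd[1] + size_y;
--         tmp = [x, y];
--         box3.append(tmp);
--
--         # box4
--         x = crd[0];
--         y = crd[1] - size_y;
--         tmp = [x, y];
--         box4.append(tmp);
--
--         # box5
--         x = crd[0] - size_x;
--         y = crd[1] + size_y;
--         tmp = [x, y];
--         box5.append(tmp);
--
--         # box6
--         x = crd[0] - size_x;
--         y = crd[1] - size_y;
--         tmp = [x, y];
--         box6.append(tmp);
--
--         # box7
--         x = crd[0] + size_x;
--         y = crd[1] + size_y;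
--         tmp = [x, y];
--         box7.append(tmp);
--
--         # box8
--         x = crd[0] + size_x;
--         y = crd[1] - size_y;
--         tmp = [x, y];
--         box8.append(tmp);
--
--     sysCRDs = box0 + box1 + box2 + box3 + box4 + box5 + box6 + box7 + box8;
--     return sysCRDs
-- ===== SOURCE B (Python) =====
-- def mkimagebox(CRDs, size_x, size_y):
--     # primary box keeps the original coordinate objects; the eight image
--     # boxes are driven by an offset table in box1..box8 order
--     offsets = [(-size_x, 0), (size_x, 0), (0, size_y), (0, -size_y),
--                (-size_x, size_y), (-size_x, -size_y),
--                (size_x, size_y), (size_x, -size_y)]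
--     result = list(CRDs)
--     for dx, dy in offsets:
--         result.extend([crd[0] + dx, crd[1] + dy] for crd in CRDs)
--     return result
-- ===== Notes on version B (the rewrite author's own statement) =====
-- stated objective: simpler
-- what changed: Replaces the single pass filling eight parallel box lists (unrolled per-box code, then a 9-way concatenation) with an 8-entry offset table driving eight map passes extended onto the primary box.
import Mathlib
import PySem

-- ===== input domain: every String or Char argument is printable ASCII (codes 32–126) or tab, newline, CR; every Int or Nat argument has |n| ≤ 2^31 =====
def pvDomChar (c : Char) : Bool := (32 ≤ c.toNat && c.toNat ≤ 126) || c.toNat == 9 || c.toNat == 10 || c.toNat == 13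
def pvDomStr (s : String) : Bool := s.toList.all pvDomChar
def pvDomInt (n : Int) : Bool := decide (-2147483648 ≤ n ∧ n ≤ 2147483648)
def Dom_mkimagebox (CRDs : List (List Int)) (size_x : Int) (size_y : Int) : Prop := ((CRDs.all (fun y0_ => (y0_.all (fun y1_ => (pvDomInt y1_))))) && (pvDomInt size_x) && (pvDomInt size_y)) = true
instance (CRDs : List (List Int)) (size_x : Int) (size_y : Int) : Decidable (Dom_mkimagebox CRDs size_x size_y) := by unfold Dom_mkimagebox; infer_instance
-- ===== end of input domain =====

-- B replaces A's one pass filling eight unrolled parallel box lists with an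
-- 8-entry offset table driving eight map passes (objective: simpler).

-- ===== PORT A =====
-- crd[i] with in-range index guaranteed by Pre_; default 0 is never used inside Pre_
def pvGet (crd : List Int) (i : Int) : Int := (PySem.List.pyGet? crd i).getD 0

def mkimagebox (CRDs : List (List Int)) (size_x : Int) (size_y : Int) : List (List Int) :=
  let st := CRDs.foldl (fun (b : List (List Int) × List (List Int) × List (List Int) × List (List Int) ×
      List (List Int) × List (List Int) × List (List Int) × List (List Int)) crd =>
    let x1 := pvGet crd 0 - size_x; let y1 := pvGet crd 1
    let x2 := pvGet crd 0 + size_x; let y2 := pvGet crd 1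
    let x3 := pvGet crd 0;          let y3 := pvGet crd 1 + size_y
    let x4 := pvGet crd 0;          let y4 := pvGet crd 1 - size_y
    let x5 := pvGet crd 0 - size_x; let y5 := pvGet crd 1 + size_y
    let x6 := pvGet crd 0 - size_x; let y6 := pvGet crd 1 - size_y
    let x7 := pvGet crd 0 + size_x; let y7 := pvGet crd 1 + size_y
    let x8 := pvGet crd 0 + size_x; let y8 := pvGet crd 1 - size_y
    (b.1 ++ [[x1, y1]], b.2.1 ++ [[x2, y2]], b.2.2.1 ++ [[x3, y3]], b.2.2.2.1 ++ [[x4, y4]],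
     b.2.2.2.2.1 ++ [[x5, y5]], b.2.2.2.2.2.1 ++ [[x6, y6]],
     b.2.2.2.2.2.2.1 ++ [[x7, y7]], b.2.2.2.2.2.2.2 ++ [[x8, y8]]))
    ([], [], [], [], [], [], [], [])
  CRDs ++ st.1 ++ st.2.1 ++ st.2.2.1 ++ st.2.2.2.1 ++ st.2.2.2.2.1 ++ st.2.2.2.2.2.1 ++
    st.2.2.2.2.2.2.1 ++ st.2.2.2.2.2.2.2

-- ===== PORT B =====
def mkimagebox_alt (CRDs : List (List Int)) (size_x : Int) (size_y : Int) : List (List Int) :=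
  let offsets : List (Int × Int) :=
    [(-size_x, 0), (size_x, 0), (0, size_y), (0, -size_y),
     (-size_x, size_y), (-size_x, -size_y), (size_x, size_y), (size_x, -size_y)]
  offsets.foldl (fun result d =>
      result ++ CRDs.map (fun crd => [pvGet crd 0 + d.1, pvGet crd 1 + d.2]))
    CRDs

-- ===== PRECONDITION & SPEC =====
-- Pre_ excludes exactly the inputs where Python A raises IndexError (a crd with fewer than 2 entries).
def Pre_mkimagebox (CRDs : List (List Int)) (size_x : Int) (size_y : Int) : Prop :=
  ∀ crd ∈ CRDs, 2 ≤ crd.length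
instance (CRDs : List (List Int)) (size_x : Int) (size_y : Int) : Decidable (Pre_mkimagebox CRDs size_x size_y) := by unfold Pre_mkimagebox; infer_instance
def pvWitness_mkimagebox : List (List Int) × Int × Int := ([[1, 2], [3, 4]], 5, 7)

def Spec_mkimagebox (CRDs : List (List Int)) (size_x : Int) (size_y : Int) (out : List (List Int)) : Prop := out = mkimagebox_alt CRDs size_x size_y
instance (CRDs : List (List Int)) (size_x : Int) (size_y : Int) (out : List (List Int)) : Decidable (Spec_mkimagebox CRDs size_x size_y out) := by unfold Spec_mkimagebox; infer_instance

-- ===== CLAIM (what is proved, stated in full; the proofs are below) =====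
def Claim_equal_mkimagebox : Prop := ∀ (CRDs : List (List Int)) (size_x : Int) (size_y : Int), Dom_mkimagebox CRDs size_x size_y → Pre_mkimagebox CRDs size_x size_y → Spec_mkimagebox CRDs size_x size_y (mkimagebox CRDs size_x size_y)

-- ===== LEMMAS AND PROOFS =====

-- A's fold appends one translated copy of each coordinate to each of the eight boxes
theorem mkimagebox_fold_eq (CRDs : List (List Int)) (size_x size_y : Int)
    (b1 b2 b3 b4 b5 b6 b7 b8 : List (List Int)) :
    CRDs.foldl (fun (b : List (List Int) × List (List Int) × List (List Int) × List (List Int) ×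
      List (List Int) × List (List Int) × List (List Int) × List (List Int)) crd =>
      let x1 := pvGet crd 0 - size_x; let y1 := pvGet crd 1
      let x2 := pvGet crd 0 + size_x; let y2 := pvGet crd 1
      let x3 := pvGet crd 0;          let y3 := pvGet crd 1 + size_y
      let x4 := pvGet crd 0;          let y4 := pvGet crd 1 - size_y
      let x5 := pvGet crd 0 - size_x; let y5 := pvGet crd 1 + size_y
      let x6 := pvGet crd 0 - size_x; let y6 := pvGet crd 1 - size_y
      let x7 := pvGet crd 0 + size_x; let y7 := pvGet crd 1 + size_y
      let x8 := pvGet crd 0 + size_x; let y8 := pvGet crd 1 - size_y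
      (b.1 ++ [[x1, y1]], b.2.1 ++ [[x2, y2]], b.2.2.1 ++ [[x3, y3]], b.2.2.2.1 ++ [[x4, y4]],
       b.2.2.2.2.1 ++ [[x5, y5]], b.2.2.2.2.2.1 ++ [[x6, y6]],
       b.2.2.2.2.2.2.1 ++ [[x7, y7]], b.2.2.2.2.2.2.2 ++ [[x8, y8]]))
      (b1, b2, b3, b4, b5, b6, b7, b8)
    = (b1 ++ CRDs.map (fun crd => [pvGet crd 0 - size_x, pvGet crd 1]),
       b2 ++ CRDs.map (fun crd => [pvGet crd 0 + size_x, pvGet crd 1]),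
       b3 ++ CRDs.map (fun crd => [pvGet crd 0, pvGet crd 1 + size_y]),
       b4 ++ CRDs.map (fun crd => [pvGet crd 0, pvGet crd 1 - size_y]),
       b5 ++ CRDs.map (fun crd => [pvGet crd 0 - size_x, pvGet crd 1 + size_y]),
       b6 ++ CRDs.map (fun crd => [pvGet crd 0 - size_x, pvGet crd 1 - size_y]),
       b7 ++ CRDs.map (fun crd => [pvGet crd 0 + size_x, pvGet crd 1 + size_y]),
       b8 ++ CRDs.map (fun crd => [pvGet crd 0 + size_x, pvGet crd 1 - size_y])) := by
  induction CRDs generalizing b1 b2 b3 b4 b5 b6 b7 b8 with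
  | nil => simp
  | cons c cs ih => simp [List.foldl_cons, ih]

-- ===== VERDICT (by name: the statement is the Claim_ definition above) =====
theorem mkimagebox_spec : Claim_equal_mkimagebox := by
  intro CRDs size_x size_y _ _
  unfold Spec_mkimagebox mkimagebox mkimagebox_alt
  simp only [mkimagebox_fold_eq, List.nil_append, List.foldl_cons, List.foldl_nil]
  simp [sub_eq_add_neg, List.append_assoc]
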